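-- pv_equiv track=rewrite | github.com/bc36/leetcode | lc_Python/lc2200_2299.py | maxTrailingZeros
-- ===== SOURCE A (Python) =====
-- from typing import List, Optional, Tuple
--
-- def maxTrailingZeros(grid: List[List[int]]) -> int:
--     def get_25(v):
--         r = [0, 0]
--         while v % 2 == 0:
--             v = v // 2
--             r[0] += 1
--         while v % 5 == 0:
--             v = v // 5
--             r[1] += 1
--         return r
--
--     m = len(grid)
--     n = len(grid[0])
--     pu = [[[0, 0] for _ in range(n + 1)] for _ in range(m + 1)]  # up
--     pl = [[[0, 0] for _ in range(n + 1)] for _ in range(m + 1)]  # left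
--
--     for i in range(m):
--         for j in range(n):
--             x = get_25(grid[i][j])
--             pu[i + 1][j + 1][0] = pu[i][j + 1][0] + x[0]
--             pu[i + 1][j + 1][1] = pu[i][j + 1][1] + x[1]
--             pl[i + 1][j + 1][0] = pl[i + 1][j][0] + x[0]
--             pl[i + 1][j + 1][1] = pl[i + 1][j][1] + x[1]
--
--     ans = 0
--     for i in range(m):
--         for j in range(n):
--             t, f = pu[i + 1][j + 1]
--             ul = min(t + pl[i + 1][j][0], f + pl[i + 1][j][1])
--             ur = min(
--                 t + pl[i + 1][-1][0] - pl[i + 1][j + 1][0],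
--                 f + pl[i + 1][-1][1] - pl[i + 1][j + 1][1],
--             )
--             t = pu[-1][j + 1][0] - pu[i][j + 1][0]
--             f = pu[-1][j + 1][1] - pu[i][j + 1][1]
--             dl = min(t + pl[i + 1][j][0], f + pl[i + 1][j][1])
--             dr = min(
--                 t + pl[i + 1][-1][0] - pl[i + 1][j + 1][0],
--                 f + pl[i + 1][-1][1] - pl[i + 1][j + 1][1],
--             )
--             ans = max(ans, ul, ur, dl, dr)
--     return ans
-- ===== SOURCE B (Python) =====
-- from typing import List, Optional, Tuple
--
-- def maxTrailingZeros(grid: List[List[int]]) -> int: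
--     # Same result as the prefix-table version, but computed without any tables:
--     # for each corner cell the four directional factor sums are re-scanned directly.
--     def get_25(v):
--         r = [0, 0]
--         while v % 2 == 0:
--             v = v // 2
--             r[0] += 1
--         while v % 5 == 0:
--             v = v // 5
--             r[1] += 1
--         return r
--
--     m, n = len(grid), len(grid[0])
--     ans = 0
--     for i in range(m):
--         for j in range(n):
--             u2 = u5 = d2 = d5 = l2 = l5 = r2 = r5 = 0
--             for r in range(i + 1):                 # rows 0..i, corner included
--                 a, b = get_25(grid[r][j]); u2 += a; u5 += b
--             for r in range(i, m):                  # rows i..m-1, corner included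
--                 a, b = get_25(grid[r][j]); d2 += a; d5 += b
--             for c in range(j):                     # columns 0..j-1, corner excluded
--                 a, b = get_25(grid[i][c]); l2 += a; l5 += b
--             for c in range(j + 1, n):              # columns j+1..n-1
--                 a, b = get_25(grid[i][c]); r2 += a; r5 += b
--             ans = max(ans,
--                       min(u2 + l2, u5 + l5), min(u2 + r2, u5 + r5),
--                       min(d2 + l2, d5 + l5), min(d2 + r2, d5 + r5))
--     return ans
-- ===== Notes on version B (the rewrite author's own statement) =====
-- stated objective: alternative
-- what changed: B drops both prefix-sum tables and instead, for each corner cell, recomputes the four directional factor-2/5 sums by scanning its row and column directly, trading A's O(mn) table precomputation for per-cell rescans.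
import Mathlib
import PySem

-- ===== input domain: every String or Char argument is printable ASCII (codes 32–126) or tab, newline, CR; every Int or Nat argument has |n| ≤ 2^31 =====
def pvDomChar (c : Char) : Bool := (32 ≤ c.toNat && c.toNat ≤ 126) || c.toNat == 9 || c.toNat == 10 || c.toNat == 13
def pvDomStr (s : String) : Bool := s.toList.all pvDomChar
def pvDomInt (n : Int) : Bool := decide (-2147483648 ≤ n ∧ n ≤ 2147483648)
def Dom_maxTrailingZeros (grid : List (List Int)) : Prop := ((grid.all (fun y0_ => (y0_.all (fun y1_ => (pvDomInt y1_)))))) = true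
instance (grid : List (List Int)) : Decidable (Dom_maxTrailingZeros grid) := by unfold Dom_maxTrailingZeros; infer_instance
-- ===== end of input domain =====

-- B replaces A's two prefix-sum tables by direct per-corner rescans of the row and
-- column (same results, no tables); equivalence is about the return value only.

-- ===== PORT A =====

-- shared helper: one Python `while v % p == 0: v //= p` loop, with fuel making it
-- total (Python diverges for v = 0; such grids are outside Pre_); returns (v, count)
def pvDivLoop (p : Int) : Nat → Int × Int → Int × Int
  | 0, s => s
  | fuel + 1, (v, c) =>
    if PySem.Int.mod v p = 0 then pvDivLoop p fuel (PySem.Int.floordiv v p, c + 1)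
    else (v, c)

-- get_25(v): counts of factor 2 and factor 5 (fuel |v| suffices for every v ≠ 0)
def pvGet25 (v : Int) : Int × Int :=
  let s2 := pvDivLoop 2 v.natAbs (v, 0)
  let s5 := pvDivLoop 5 s2.1.natAbs (s2.1, 0)
  (s2.2, s5.2)

-- grid[i][j] (always in range under Pre_, so the defaults are never used there)
def pvCell (grid : List (List Int)) (i j : Int) : Int :=
  PySem.List.pyGetD (PySem.List.pyGetD grid i []) j 0

abbrev PvTab := Int → Int → Int × Int

-- pu[a][b] = v (single mutable-array assignment, modeled as function update)
def pvUpd (f : PvTab) (a b : Int) (v : Int × Int) : PvTab :=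
  fun a' b' => if a' = a ∧ b' = b then v else f a' b'

-- body of A's fill loop for one (i, j): the four assignments to pu/pl at (i+1, j+1)
def pvFillCell (grid : List (List Int)) (i : Int) (st : PvTab × PvTab) (j : Int) :
    PvTab × PvTab :=
  let x := pvGet25 (pvCell grid i j)
  let pu := st.1
  let pl := st.2
  (pvUpd pu (i + 1) (j + 1) ((pu i (j + 1)).1 + x.1, (pu i (j + 1)).2 + x.2),
   pvUpd pl (i + 1) (j + 1) ((pl (i + 1) j).1 + x.1, (pl (i + 1) j).2 + x.2))

def pvFillRow (grid : List (List Int)) (n : Int) (st : PvTab × PvTab) (i : Int) :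
    PvTab × PvTab :=
  (PySem.List.pyRange 0 n 1).foldl (pvFillCell grid i) st

-- the two (m+1)×(n+1) tables after A's first double loop (initially all [0, 0])
def pvFill (grid : List (List Int)) (m n : Int) : PvTab × PvTab :=
  (PySem.List.pyRange 0 m 1).foldl (pvFillRow grid n) (fun _ _ => (0, 0), fun _ _ => (0, 0))

-- body of A's answer loop; pu[-1] is row m and pl[i+1][-1] is column n (lengths m+1, n+1)
def pvAnsCell (pu pl : PvTab) (m n i : Int) (ans j : Int) : Int :=
  let t := (pu (i + 1) (j + 1)).1
  let f := (pu (i + 1) (j + 1)).2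
  let ul := min (t + (pl (i + 1) j).1) (f + (pl (i + 1) j).2)
  let ur := min (t + (pl (i + 1) n).1 - (pl (i + 1) (j + 1)).1)
                (f + (pl (i + 1) n).2 - (pl (i + 1) (j + 1)).2)
  let t2 := (pu m (j + 1)).1 - (pu i (j + 1)).1
  let f2 := (pu m (j + 1)).2 - (pu i (j + 1)).2
  let dl := min (t2 + (pl (i + 1) j).1) (f2 + (pl (i + 1) j).2)
  let dr := min (t2 + (pl (i + 1) n).1 - (pl (i + 1) (j + 1)).1)
                (f2 + (pl (i + 1) n).2 - (pl (i + 1) (j + 1)).2)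
  max (max (max (max ans ul) ur) dl) dr

def maxTrailingZeros (grid : List (List Int)) : Int :=
  let m : Int := grid.length
  let n : Int := grid.headI.length   -- len(grid[0]); grid = [] raises, excluded by Pre_
  let st := pvFill grid m n
  (PySem.List.pyRange 0 m 1).foldl
    (fun ans i => (PySem.List.pyRange 0 n 1).foldl (pvAnsCell st.1 st.2 m n i) ans) 0

-- ===== PORT B =====

-- sum of get_25 over grid[r][j] for r in range(a, b)   (B's two vertical loops)
def pvColSum (grid : List (List Int)) (j a b : Int) : Int × Int :=
  (PySem.List.pyRange a b 1).foldl
    (fun s r => let x := pvGet25 (pvCell grid r j); (s.1 + x.1, s.2 + x.2)) (0, 0)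

-- sum of get_25 over grid[i][c] for c in range(a, b)   (B's two horizontal loops)
def pvRowSum (grid : List (List Int)) (i a b : Int) : Int × Int :=
  (PySem.List.pyRange a b 1).foldl
    (fun s c => let x := pvGet25 (pvCell grid i c); (s.1 + x.1, s.2 + x.2)) (0, 0)

-- body of B's loop for one corner (i, j)
def pvAltCell (grid : List (List Int)) (m n i : Int) (ans j : Int) : Int :=
  let u := pvColSum grid j 0 (i + 1)
  let d := pvColSum grid j i m
  let l := pvRowSum grid i 0 j
  let r := pvRowSum grid i (j + 1) n
  max (max (max (max ans (min (u.1 + l.1) (u.2 + l.2))) (min (u.1 + r.1) (u.2 + r.2)))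
        (min (d.1 + l.1) (d.2 + l.2))) (min (d.1 + r.1) (d.2 + r.2))

def maxTrailingZeros_alt (grid : List (List Int)) : Int :=
  let m : Int := grid.length
  let n : Int := grid.headI.length
  (PySem.List.pyRange 0 m 1).foldl
    (fun ans i => (PySem.List.pyRange 0 n 1).foldl (pvAltCell grid m n i) ans) 0

-- ===== PRECONDITION & SPEC =====
-- Pre_ excludes exactly the inputs where Python A does not return: the empty grid
-- (grid[0] raises IndexError), rows shorter than grid[0] (IndexError), and a zero
-- among the first len(grid[0]) entries of a row (get_25(0) loops forever).
def Pre_maxTrailingZeros (grid : List (List Int)) : Prop :=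
  grid ≠ [] ∧ ∀ row ∈ grid,
    grid.headI.length ≤ row.length ∧ ∀ v ∈ row.take grid.headI.length, v ≠ 0
instance (grid : List (List Int)) : Decidable (Pre_maxTrailingZeros grid) := by
  unfold Pre_maxTrailingZeros; infer_instance

def pvWitness_maxTrailingZeros : List (List Int) := [[2, 5], [10, 4]]

def Spec_maxTrailingZeros (grid : List (List Int)) (out : Int) : Prop := out = maxTrailingZeros_alt grid
instance (grid : List (List Int)) (out : Int) : Decidable (Spec_maxTrailingZeros grid out) := by unfold Spec_maxTrailingZeros; infer_instance

-- ===== CLAIM (what is proved, stated in full; the proofs are below) =====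
def Claim_equal_maxTrailingZeros : Prop := ∀ (grid : List (List Int)), Dom_maxTrailingZeros grid → Pre_maxTrailingZeros grid → Spec_maxTrailingZeros grid (maxTrailingZeros grid)

-- ===== LEMMAS AND PROOFS =====

-- sum of get_25 over the first k rows of column j  /  first k columns of row i
set_option maxHeartbeats 1000000 in
def pvKeyU (grid : List (List Int)) (j : Int) : Nat → Int × Int
  | 0 => (0, 0)
  | k + 1 =>
    let s := pvKeyU grid j k
    let x := pvGet25 (pvCell grid (k : Int) j)
    (s.1 + x.1, s.2 + x.2)

def pvKeyL (grid : List (List Int)) (i : Int) : Nat → Int × Int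
  | 0 => (0, 0)
  | k + 1 =>
    let s := pvKeyL grid i k
    let x := pvGet25 (pvCell grid i (k : Int))
    (s.1 + x.1, s.2 + x.2)

lemma pvColSum_eq_keyU (grid : List (List Int)) (j : Int) (k : Nat) :
    pvColSum grid j 0 (k : Int) = pvKeyU grid j k := by
  induction k with
  | zero => simp [pvColSum, PySem.List.pyRange_one_eq_nil, pvKeyU]
  | succ k ih =>
    have h : ((k : Int) + 1) = ((k + 1 : Nat) : Int) := by push_cast; ring
    rw [pvKeyU, ← h]
    simp only [pvColSum] at *
    rw [show (PySem.List.pyRange 0 ((k : Int) + 1) 1)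
          = PySem.List.pyRange 0 (k : Int) 1 ++ [(k : Int)] from
        PySem.List.pyRange_one_succ_right (by positivity)]
    simp only [List.foldl_append, List.foldl_cons, List.foldl_nil]
    rw [ih]

lemma pvRowSum_eq_keyL (grid : List (List Int)) (i : Int) (k : Nat) :
    pvRowSum grid i 0 (k : Int) = pvKeyL grid i k := by
  induction k with
  | zero => simp [pvRowSum, PySem.List.pyRange_one_eq_nil, pvKeyL]
  | succ k ih =>
    have h : ((k : Int) + 1) = ((k + 1 : Nat) : Int) := by push_cast; ring
    rw [pvKeyL, ← h]
    simp only [pvRowSum] at *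
    rw [show (PySem.List.pyRange 0 ((k : Int) + 1) 1)
          = PySem.List.pyRange 0 (k : Int) 1 ++ [(k : Int)] from
        PySem.List.pyRange_one_succ_right (by positivity)]
    simp only [List.foldl_append, List.foldl_cons, List.foldl_nil]
    rw [ih]

lemma pvColSum_split (grid : List (List Int)) (j : Int) (a b : Nat) (hab : a ≤ b) :
    pvColSum grid j (a : Int) (b : Int)
      = ((pvKeyU grid j b).1 - (pvKeyU grid j a).1,
         (pvKeyU grid j b).2 - (pvKeyU grid j a).2) := by
  induction b with
  | zero =>
    have : a = 0 := Nat.le_zero.mp hab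
    subst this
    simp [pvColSum, PySem.List.pyRange_one_eq_nil, pvKeyU]
  | succ b ih =>
    rcases Nat.lt_or_ge a (b + 1) with h | h
    · have hab' : a ≤ b := Nat.lt_succ_iff.mp h
      have hc : ((b + 1 : Nat) : Int) = (b : Int) + 1 := by push_cast; ring
      simp only [pvColSum] at *
      rw [hc, show (PySem.List.pyRange (a : Int) ((b : Int) + 1) 1)
            = PySem.List.pyRange (a : Int) (b : Int) 1 ++ [(b : Int)] from
          PySem.List.pyRange_one_succ_right (by exact_mod_cast hab')]
      simp only [List.foldl_append, List.foldl_cons, List.foldl_nil]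
      rw [ih hab', pvKeyU]
      rw [Prod.mk.injEq]
      exact ⟨by ring, by ring⟩
    · have : a = b + 1 := le_antisymm hab h
      subst this
      simp [pvColSum, PySem.List.pyRange_one_eq_nil]

lemma pvRowSum_split (grid : List (List Int)) (i : Int) (a b : Nat) (hab : a ≤ b) :
    pvRowSum grid i (a : Int) (b : Int)
      = ((pvKeyL grid i b).1 - (pvKeyL grid i a).1,
         (pvKeyL grid i b).2 - (pvKeyL grid i a).2) := by
  induction b with
  | zero =>
    have : a = 0 := Nat.le_zero.mp hab
    subst this
    simp [pvRowSum, PySem.List.pyRange_one_eq_nil, pvKeyL]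
  | succ b ih =>
    rcases Nat.lt_or_ge a (b + 1) with h | h
    · have hab' : a ≤ b := Nat.lt_succ_iff.mp h
      have hc : ((b + 1 : Nat) : Int) = (b : Int) + 1 := by push_cast; ring
      simp only [pvRowSum] at *
      rw [hc, show (PySem.List.pyRange (a : Int) ((b : Int) + 1) 1)
            = PySem.List.pyRange (a : Int) (b : Int) 1 ++ [(b : Int)] from
          PySem.List.pyRange_one_succ_right (by exact_mod_cast hab')]
      simp only [List.foldl_append, List.foldl_cons, List.foldl_nil]
      rw [ih hab', pvKeyL]
      rw [Prod.mk.injEq]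
      exact ⟨by ring, by ring⟩
    · have : a = b + 1 := le_antisymm hab h
      subst this
      simp [pvRowSum, PySem.List.pyRange_one_eq_nil]

-- the invariant of A's fill loop: in-box entries are the prefix sums, others [0,0]
def PvTabSpec (grid : List (List Int)) (M N : Nat) (st : PvTab × PvTab) : Prop :=
  (∀ a b : Int, ¬(1 ≤ a ∧ a ≤ (M : Int) ∧ 1 ≤ b ∧ b ≤ (N : Int)) →
      st.1 a b = (0, 0) ∧ st.2 a b = (0, 0)) ∧
  (∀ p q : Nat, p < M → q < N →
      st.1 ((p : Int) + 1) ((q : Int) + 1) = pvKeyU grid (q : Int) (p + 1) ∧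
      st.2 ((p : Int) + 1) ((q : Int) + 1) = pvKeyL grid (p : Int) (q + 1))

lemma pvRowfill (grid : List (List Int)) (M N : Nat) (st : PvTab × PvTab)
    (hst : PvTabSpec grid M N st) (K : Nat) (hK : K ≤ N) :
    (∀ a b : Int, ¬(a = (M : Int) + 1 ∧ 1 ≤ b ∧ b ≤ (K : Int)) →
        ((PySem.List.pyRange 0 (K : Int) 1).foldl (pvFillCell grid (M : Int)) st).1 a b = st.1 a b ∧
        ((PySem.List.pyRange 0 (K : Int) 1).foldl (pvFillCell grid (M : Int)) st).2 a b = st.2 a b) ∧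
    (∀ q : Nat, q < K →
        ((PySem.List.pyRange 0 (K : Int) 1).foldl (pvFillCell grid (M : Int)) st).1 ((M : Int) + 1) ((q : Int) + 1)
          = pvKeyU grid (q : Int) (M + 1) ∧
        ((PySem.List.pyRange 0 (K : Int) 1).foldl (pvFillCell grid (M : Int)) st).2 ((M : Int) + 1) ((q : Int) + 1)
          = pvKeyL grid (M : Int) (q + 1)) := by
  induction K with
  | zero =>
    constructor
    · intro a b _
      simp [PySem.List.pyRange_one_eq_nil]
    · intro q hq; omega
  | succ K ih =>
    have hK' : K ≤ N := Nat.le_of_succ_le hK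
    obtain ⟨frame, filled⟩ := ih hK'
    have hc : ((K + 1 : Nat) : Int) = (K : Int) + 1 := by push_cast; ring
    rw [hc, show (PySem.List.pyRange 0 ((K : Int) + 1) 1)
          = PySem.List.pyRange 0 (K : Int) 1 ++ [(K : Int)] from
        PySem.List.pyRange_one_succ_right (by positivity)]
    set stK := (PySem.List.pyRange 0 (K : Int) 1).foldl (pvFillCell grid (M : Int)) st with hstK
    simp only [List.foldl_append, List.foldl_cons, List.foldl_nil]
    -- value read from pu row M at column K+1
    have hpuRead : stK.1 (M : Int) ((K : Int) + 1) = pvKeyU grid (K : Int) M := by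
      have hfr := frame (M : Int) ((K : Int) + 1) (by omega)
      rcases Nat.eq_zero_or_pos M with hM | hM
      · rw [hfr.1]
        have := (hst.1 (M : Int) ((K : Int) + 1) (by omega)).1
        rw [this]; subst hM; rfl
      · rw [hfr.1]
        have hcast : (M : Int) = ((M - 1 : Nat) : Int) + 1 := by omega
        rw [hcast]
        have := (hst.2 (M - 1) K (by omega) (by omega)).1
        rw [this]
        congr 1
        omega
    -- value read from pl row M+1 at column K
    have hplRead : stK.2 ((M : Int) + 1) (K : Int) = pvKeyL grid (M : Int) K := by
      rcases Nat.eq_zero_or_pos K with hk0 | hk0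
      · have hfr := frame ((M : Int) + 1) (K : Int) (by omega)
        rw [hfr.2]
        have := (hst.1 ((M : Int) + 1) (K : Int) (by omega)).2
        rw [this]; subst hk0; rfl
      · have hcast : (K : Int) = ((K - 1 : Nat) : Int) + 1 := by omega
        rw [hcast]
        have := (filled (K - 1) (by omega)).2
        rw [this]
        congr 1
        omega
    constructor
    · intro a b hab
      have hne : ¬(a = (M : Int) + 1 ∧ b = (K : Int) + 1) := by
        intro ⟨h1, h2⟩; exact hab ⟨h1, by omega, by omega⟩
      have hfr := frame a b (by intro ⟨h1, h2, h3⟩; exact hab ⟨h1, h2, by omega⟩)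
      constructor
      · show (pvFillCell grid (M : Int) stK (K : Int)).1 a b = st.1 a b
        simp only [pvFillCell, pvUpd]
        rw [if_neg (by intro ⟨h1, h2⟩; exact hne ⟨h1, by omega⟩)]
        exact hfr.1
      · show (pvFillCell grid (M : Int) stK (K : Int)).2 a b = st.2 a b
        simp only [pvFillCell, pvUpd]
        rw [if_neg (by intro ⟨h1, h1'⟩; exact hne ⟨h1, by omega⟩)]
        exact hfr.2
    · intro q hq
      rcases Nat.lt_or_ge q K with hqK | hqK
      · -- older cell of this row: untouched by the last write
        have hqne : ((q : Int) + 1) ≠ (K : Int) + 1 := by omega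
        constructor
        · show (pvFillCell grid (M : Int) stK (K : Int)).1 _ _ = _
          simp only [pvFillCell, pvUpd]
          rw [if_neg (by intro ⟨_, h2⟩; exact hqne (by omega))]
          exact (filled q hqK).1
        · show (pvFillCell grid (M : Int) stK (K : Int)).2 _ _ = _
          simp only [pvFillCell, pvUpd]
          rw [if_neg (by intro ⟨_, h2⟩; exact hqne (by omega))]
          exact (filled q hqK).2
      · have hqK' : K = q := by omega
        subst hqK'
        constructor
        · show (pvFillCell grid (M : Int) stK (K : Int)).1 _ _ = _
          simp only [pvFillCell, pvUpd]
          rw [if_pos (by simp), hpuRead]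
          rfl
        · show (pvFillCell grid (M : Int) stK (K : Int)).2 _ _ = _
          simp only [pvFillCell, pvUpd]
          rw [if_pos (by simp), hplRead]
          rfl

lemma pvFill_spec (grid : List (List Int)) (N : Nat) (M : Nat) :
    PvTabSpec grid M N (pvFill grid (M : Int) (N : Int)) := by
  induction M with
  | zero =>
    constructor
    · intro a b _; simp [pvFill, PySem.List.pyRange_one_eq_nil]
    · intro p q hp _; omega
  | succ M ih =>
    have hc : ((M + 1 : Nat) : Int) = (M : Int) + 1 := by push_cast; ring
    have hEq : pvFill grid ((M + 1 : Nat) : Int) (N : Int)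
        = pvFillRow grid (N : Int) (pvFill grid (M : Int) (N : Int)) (M : Int) := by
      rw [pvFill, pvFill, hc,
        show (PySem.List.pyRange 0 ((M : Int) + 1) 1)
            = PySem.List.pyRange 0 (M : Int) 1 ++ [(M : Int)] from
          PySem.List.pyRange_one_succ_right (by positivity)]
      simp [List.foldl_append]
    rw [hEq]
    obtain ⟨frame, filled⟩ := pvRowfill grid M N _ ih N le_rfl
    constructor
    · intro a b hab
      have h1 : ¬(a = (M : Int) + 1 ∧ 1 ≤ b ∧ b ≤ (N : Int)) := by
        intro ⟨e1, e2, e3⟩; exact hab ⟨by omega, by omega, e2, e3⟩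
      have hfr := frame a b h1
      have h2 : ¬(1 ≤ a ∧ a ≤ (M : Int) ∧ 1 ≤ b ∧ b ≤ (N : Int)) := by
        intro ⟨e1, e2, e3, e4⟩
        rcases Classical.em (a = (M : Int) + 1) with he | he
        · omega
        · exact hab ⟨e1, by push_cast; omega, e3, e4⟩
      have hz := ih.1 a b h2
      exact ⟨by simp only [pvFillRow] at hfr ⊢; rw [hfr.1, hz.1],
             by simp only [pvFillRow] at hfr ⊢; rw [hfr.2, hz.2]⟩
    · intro p q hp hq
      rcases Nat.lt_or_ge p M with hpM | hpM
      · have hfr := frame ((p : Int) + 1) ((q : Int) + 1) (by intro ⟨e1, _⟩; omega)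
        have := ih.2 p q hpM hq
        exact ⟨by simp only [pvFillRow] at hfr ⊢; rw [hfr.1]; exact this.1,
               by simp only [pvFillRow] at hfr ⊢; rw [hfr.2]; exact this.2⟩
      · have hpM' : p = M := by omega
        subst hpM'
        have := filled q hq
        exact ⟨by simp only [pvFillRow]; exact this.1, by simp only [pvFillRow]; exact this.2⟩

-- read corollaries
lemma pvReadU (grid : List (List Int)) (M N : Nat) (p q : Nat) (hp : p ≤ M) (hq : q < N) :
    (pvFill grid (M : Int) (N : Int)).1 (p : Int) ((q : Int) + 1) = pvKeyU grid (q : Int) p := by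
  rcases Nat.eq_zero_or_pos p with h0 | h0
  · subst h0
    have := (pvFill_spec grid N M).1 0 ((q : Int) + 1) (by omega)
    simp only [Nat.cast_zero]
    rw [this.1]; rfl
  · have hcast : (p : Int) = ((p - 1 : Nat) : Int) + 1 := by omega
    rw [hcast]
    have := ((pvFill_spec grid N M).2 (p - 1) q (by omega) hq).1
    rw [this]
    congr 1
    omega

lemma pvReadL (grid : List (List Int)) (M N : Nat) (p q : Nat) (hp : p < M) (hq : q ≤ N) :
    (pvFill grid (M : Int) (N : Int)).2 ((p : Int) + 1) (q : Int) = pvKeyL grid (p : Int) q := by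
  rcases Nat.eq_zero_or_pos q with h0 | h0
  · subst h0
    have := (pvFill_spec grid N M).1 ((p : Int) + 1) 0 (by omega)
    simp only [Nat.cast_zero]
    rw [this.2]; rfl
  · have hcast : (q : Int) = ((q - 1 : Nat) : Int) + 1 := by omega
    rw [hcast]
    have := ((pvFill_spec grid N M).2 p (q - 1) hp (by omega)).2
    rw [this]
    congr 1
    omega

set_option maxHeartbeats 800000 in
lemma pvCell_eq (grid : List (List Int)) (M N : Nat) (p q : Nat)
    (hp : p < M) (hq : q < N) (ans : Int) :
    pvAnsCell (pvFill grid (M : Int) (N : Int)).1 (pvFill grid (M : Int) (N : Int)).2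
        (M : Int) (N : Int) (p : Int) ans (q : Int)
      = pvAltCell grid (M : Int) (N : Int) (p : Int) ans (q : Int) := by
  have hU1 : (pvFill grid (M : Int) (N : Int)).1 ((p : Int) + 1) ((q : Int) + 1)
      = pvKeyU grid (q : Int) (p + 1) := by
    have := pvReadU grid M N (p + 1) q (by omega) hq
    rw [← this]; congr 1 <;> push_cast <;> ring
  have hUM : (pvFill grid (M : Int) (N : Int)).1 (M : Int) ((q : Int) + 1)
      = pvKeyU grid (q : Int) M := pvReadU grid M N M q le_rfl hq
  have hUp : (pvFill grid (M : Int) (N : Int)).1 (p : Int) ((q : Int) + 1)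
      = pvKeyU grid (q : Int) p := pvReadU grid M N p q (by omega) hq
  have hLq : (pvFill grid (M : Int) (N : Int)).2 ((p : Int) + 1) (q : Int)
      = pvKeyL grid (p : Int) q := pvReadL grid M N p q hp (by omega)
  have hLN : (pvFill grid (M : Int) (N : Int)).2 ((p : Int) + 1) (N : Int)
      = pvKeyL grid (p : Int) N := pvReadL grid M N p N hp le_rfl
  have hLq1 : (pvFill grid (M : Int) (N : Int)).2 ((p : Int) + 1) ((q : Int) + 1)
      = pvKeyL grid (p : Int) (q + 1) := by
    have := pvReadL grid M N p (q + 1) hp (by omega)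
    rw [← this]; congr 1 <;> push_cast <;> ring
  have hBu : pvColSum grid (q : Int) 0 ((p : Int) + 1) = pvKeyU grid (q : Int) (p + 1) := by
    have := pvColSum_eq_keyU grid (q : Int) (p + 1)
    rw [← this]; congr 1 <;> push_cast <;> ring
  have hBd : pvColSum grid (q : Int) (p : Int) (M : Int)
      = ((pvKeyU grid (q : Int) M).1 - (pvKeyU grid (q : Int) p).1,
         (pvKeyU grid (q : Int) M).2 - (pvKeyU grid (q : Int) p).2) :=
    pvColSum_split grid (q : Int) p M (by omega)
  have hBl : pvRowSum grid (p : Int) 0 (q : Int) = pvKeyL grid (p : Int) q :=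
    pvRowSum_eq_keyL grid (p : Int) q
  have hBr : pvRowSum grid (p : Int) ((q : Int) + 1) (N : Int)
      = ((pvKeyL grid (p : Int) N).1 - (pvKeyL grid (p : Int) (q + 1)).1,
         (pvKeyL grid (p : Int) N).2 - (pvKeyL grid (p : Int) (q + 1)).2) := by
    have := pvRowSum_split grid (p : Int) (q + 1) N (by omega)
    rw [← this]; congr 1 <;> push_cast <;> ring
  simp only [pvAnsCell, pvAltCell, hU1, hUM, hUp, hLq, hLN, hLq1, hBu, hBd, hBl, hBr]
  simp only [add_sub_assoc]

-- ===== VERDICT (by name: the statement is the Claim_ definition above) =====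
theorem maxTrailingZeros_spec : Claim_equal_maxTrailingZeros := by
  intro grid _ _
  show maxTrailingZeros grid = maxTrailingZeros_alt grid
  simp only [maxTrailingZeros, maxTrailingZeros_alt]
  apply PySem.List.foldl_congr_mem
  intro ans i hi
  rw [PySem.List.mem_pyRange_one] at hi
  apply PySem.List.foldl_congr_mem
  intro acc j hj
  rw [PySem.List.mem_pyRange_one] at hj
  have hi' : i = ((i.toNat : Nat) : Int) := by omega
  have hj' : j = ((j.toNat : Nat) : Int) := by omega
  rw [hi', hj']
  exact pvCell_eq grid grid.length grid.headI.length i.toNat j.toNat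
    (by omega) (by omega) acc
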